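-- pv_equiv track=rewrite | github.com/awryl/compression-money | monnaie.py | incidents
-- ===== SOURCE A (Python) =====
-- def incidents (_mat,i):
-- 	liste = []
-- 	for (a,b,v) in _mat:
-- 		if (i in a):
-- 			for y in b:
-- 				if (not(y in liste)):
-- 					liste.append(y)
-- 		if (i in b):
-- 			for x in a:
-- 				if (not(x in liste)):
-- 					liste.append(x)
-- 	return liste
-- ===== SOURCE B (Python) =====
-- def incidents(_mat, i):
--     # phase 1: gather all candidate neighbours into one flat list
--     cand = []
--     for (a, b, v) in _mat:
--         if i in a:
--             cand.extend(b)
--         if i in b: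
--             cand.extend(a)
--     # phase 2: dedup by repeatedly taking the head and filtering out its duplicates
--     out = []
--     while cand:
--         x = cand[0]
--         out.append(x)
--         cand = [y for y in cand if y != x]
--     return out
-- ===== Notes on version B (the rewrite author's own statement) =====
-- stated objective: alternative
-- what changed: Replaces A's interleaved collect-and-dedup (a seen-list membership scan per candidate inside nested loops) by a flat gather pass followed by a selection-style dedup that repeatedly takes the head and filters every remaining occurrence of it out of the candidate list.
import Mathlib
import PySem

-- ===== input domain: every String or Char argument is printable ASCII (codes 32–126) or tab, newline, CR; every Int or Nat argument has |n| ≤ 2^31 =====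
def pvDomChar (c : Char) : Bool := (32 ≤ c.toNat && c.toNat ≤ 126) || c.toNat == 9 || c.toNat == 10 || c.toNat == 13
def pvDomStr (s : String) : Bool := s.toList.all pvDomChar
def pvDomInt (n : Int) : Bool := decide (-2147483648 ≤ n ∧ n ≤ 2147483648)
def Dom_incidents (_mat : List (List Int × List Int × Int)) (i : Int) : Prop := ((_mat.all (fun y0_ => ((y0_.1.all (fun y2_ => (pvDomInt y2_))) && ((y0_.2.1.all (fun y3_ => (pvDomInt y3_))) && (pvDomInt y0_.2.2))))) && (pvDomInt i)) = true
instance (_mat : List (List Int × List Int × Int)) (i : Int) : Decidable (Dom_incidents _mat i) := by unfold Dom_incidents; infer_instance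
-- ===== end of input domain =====

-- B gathers all candidate neighbours into one flat list, then dedups by repeatedly taking the
-- head and filtering its remaining occurrences out, instead of A's seen-scan per candidate.

-- ===== PORT A =====
-- body of A's loop over one triple: two guarded dedup-append inner loops
def dedupStep (i : Int) (liste : List Int) (t : List Int × List Int × Int) : List Int :=
  match t with
  | (a, b, _v) =>
    let liste := if a.contains i then
        b.foldl (fun l y => if l.contains y then l else l ++ [y]) liste
      else liste
    if b.contains i then
        a.foldl (fun l x => if l.contains x then l else l ++ [x]) liste
      else liste

def incidents (_mat : List (List Int × List Int × Int)) (i : Int) : List Int :=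
  _mat.foldl (dedupStep i) []

-- ===== PORT B =====
-- body of B's gather loop over one triple: two guarded cand.extend(...)
def gatherStep (i : Int) (c : List Int) (t : List Int × List Int × Int) : List Int :=
  match t with
  | (a, b, _v) =>
    let c := if a.contains i then c ++ b else c
    if b.contains i then c ++ a else c

-- B's while loop: take the head, filter out all its occurrences, repeat
def filterDedup : List Int → List Int
  | [] => []
  | x :: xs => x :: filterDedup (xs.filter (fun y => y ≠ x))
  termination_by l => l.length
  decreasing_by
    simp only [List.length_cons, List.length_unattach, Nat.lt_succ_iff]
    exact le_trans (List.length_filter_le _ _) (by simp)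

def incidents_alt (_mat : List (List Int × List Int × Int)) (i : Int) : List Int :=
  let cand := _mat.foldl (gatherStep i) []
  filterDedup cand

-- ===== PRECONDITION & SPEC =====
def Spec_incidents (_mat : List (List Int × List Int × Int)) (i : Int) (out : List Int) : Prop := out = incidents_alt _mat i
instance (_mat : List (List Int × List Int × Int)) (i : Int) (out : List Int) : Decidable (Spec_incidents _mat i out) := by unfold Spec_incidents; infer_instance

-- ===== CLAIM (what is proved, stated in full; the proofs are below) =====
def Claim_equal_incidents : Prop := ∀ (_mat : List (List Int × List Int × Int)) (i : Int), Dom_incidents _mat i → Spec_incidents _mat i (incidents _mat i)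

-- ===== LEMMAS AND PROOFS =====

-- A's inner dedup-append loop over a chunk is Set.update.
theorem pv_inner_eq_update (b : List Int) (l : List Int) :
    b.foldl (fun l y => if l.contains y then l else l ++ [y]) l = PySem.Set.update l b := by
  induction b generalizing l with
  | nil => rfl
  | cons y b ih =>
    simp only [List.foldl, PySem.Set.update_cons, PySem.Set.add, PySem.Set.contains_eq_listContains, ih]; rfl

-- B's gather loop with a seed is the seed followed by the gather from the empty list.
theorem pv_gather_seed (mat : List (List Int × List Int × Int)) (i : Int) (c : List Int) :
    mat.foldl (gatherStep i) c = c ++ mat.foldl (gatherStep i) [] := by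
  induction mat generalizing c with
  | nil => simp
  | cons t mat ih =>
    obtain ⟨a, b, v⟩ := t
    simp only [List.foldl]
    rw [ih, ih (c := gatherStep i [] (a, b, v))]
    simp only [gatherStep]
    split_ifs <;> simp

-- A's outer loop is Set.update by the flat gathered list.
theorem pv_A_eq_update (mat : List (List Int × List Int × Int)) (i : Int) (s : List Int) :
    mat.foldl (dedupStep i) s = PySem.Set.update s (mat.foldl (gatherStep i) []) := by
  induction mat generalizing s with
  | nil => rfl
  | cons t mat ih =>
    obtain ⟨a, b, v⟩ := t
    simp only [List.foldl]
    rw [ih, pv_gather_seed mat i (gatherStep i [] (a, b, v)), PySem.Set.update_append]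
    congr 1
    simp only [dedupStep, gatherStep, pv_inner_eq_update]
    split_ifs <;> simp [PySem.Set.update_append]

-- Updating by a list never containing x, already containing x in the seed, ignores x-filtering.
theorem pv_update_filter (x : Int) (s m : List Int) (hx : x ∈ s) :
    PySem.Set.update s m = PySem.Set.update s (m.filter (fun y => y ≠ x)) := by
  induction m generalizing s with
  | nil => rfl
  | cons y m ih =>
    by_cases hyx : y = x
    · subst hyx
      simp only [List.filter_cons, decide_eq_true_eq, PySem.Set.update_cons]
      have : PySem.Set.add s y = s := by
        simp only [PySem.Set.add, PySem.Set.contains_eq_listContains]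
        simp only [List.contains_iff_mem]
        simp [hx]
      simp only [ne_eq, not_true_eq_false, if_false, this]
      exact ih s hx
    · simp only [List.filter_cons, ne_eq, hyx, not_false_eq_true, decide_true, if_true,
        PySem.Set.update_cons]
      apply ih
      simp [PySem.Set.add]
      split_ifs <;> simp [hx]

-- If x occurs nowhere in m, it can be moved out of the accumulator.
theorem pv_update_cons_acc (x : Int) (s m : List Int) (hx : x ∉ m) :
    PySem.Set.update (x :: s) m = x :: PySem.Set.update s m := by
  induction m generalizing s with
  | nil => rfl
  | cons y m ih =>
    have hyx : y ≠ x := fun h => hx (h ▸ List.mem_cons_self)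
    have hxm : x ∉ m := fun h => hx (List.mem_cons_of_mem _ h)
    have hbx : (y == x) = false := by simp [hyx]
    simp only [PySem.Set.update_cons, PySem.Set.add, PySem.Set.contains_eq_listContains,
      List.contains_cons, hbx, Bool.false_or]
    split_ifs with hc
    · exact ih s hxm
    · exact ih (s ++ [y]) hxm

-- Seen-scan dedup equals selection-by-filter dedup.
theorem pv_setOfList_eq_filterDedup (l : List Int) :
    PySem.Set.update [] l = filterDedup l := by
  induction hn : l.length using Nat.strong_induction_on generalizing l with
  | _ n ih =>
    match l with
    | [] => simp [filterDedup, PySem.Set.update]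
    | x :: xs =>
      rw [filterDedup]
      have h1 : PySem.Set.update [] (x :: xs) = PySem.Set.update [x] xs := by
        simp [PySem.Set.update_cons, PySem.Set.add, PySem.Set.contains]
      rw [h1, pv_update_filter x [x] xs (List.mem_singleton.mpr rfl),
        pv_update_cons_acc x [] _ (by simp)]
      congr 1
      exact ih (xs.filter (fun y => y ≠ x)).length
        (by simpa [← hn] using Nat.lt_succ_of_le (List.length_filter_le _ xs)) _ rfl

-- ===== VERDICT (by name: the statement is the Claim_ definition above) =====
theorem incidents_spec : Claim_equal_incidents := by
  intro mat i _
  show incidents mat i = incidents_alt mat i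
  unfold incidents incidents_alt
  rw [pv_A_eq_update, pv_setOfList_eq_filterDedup]
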